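-- pv_equiv track=rewrite | github.com/wenxind/privacy-utility-tradeoff-in-peer-review-data | projection.py | edge_map
-- ===== SOURCE A (Python) =====
-- def no_cross(a, b):
--     return set(a).intersection(set(b)) == set()
--
-- def edge_map(assignments):
--     graph = dict()
--     num_assignments = len(assignments)
--     for i in range(num_assignments):
--         graph[assignments[i]] = set()
--
--     for i in range(num_assignments):
--         for j in range(i+1, num_assignments):
--             if no_cross(assignments[i], assignments[j]):
--                 graph[assignments[i]].add(assignments[j])
--                 graph[assignments[j]].add(assignments[i])
--     return graph
-- ===== SOURCE B (Python) =====
-- def edge_map(assignments):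
--     keys = list(dict.fromkeys(assignments))
--     # inverted index: element value -> list of distinct assignments containing it
--     buckets = {}
--     for a in keys:
--         for e in set(a):
--             buckets.setdefault(e, []).append(a)
--     graph = {}
--     for a in keys:
--         conflict = {a}
--         for e in set(a):
--             conflict.update(buckets[e])
--         graph[a] = {b for b in keys if b not in conflict}
--     return graph
-- ===== Notes on version B (the rewrite author's own statement) =====
-- stated objective: alternative
-- what changed: A checks every index pair i<j with a fresh set-intersection per pair and mutates the adjacency dict symmetrically; B builds an inverted index from element values to the distinct assignments containing them, then derives each assignment's conflict set as the union of its elements' buckets and takes the complement within the distinct keys.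
-- outside the precondition, e.g. on edge_map([(), ()]): A returns {(): {()}}, B returns {(): set()}
import Mathlib
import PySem

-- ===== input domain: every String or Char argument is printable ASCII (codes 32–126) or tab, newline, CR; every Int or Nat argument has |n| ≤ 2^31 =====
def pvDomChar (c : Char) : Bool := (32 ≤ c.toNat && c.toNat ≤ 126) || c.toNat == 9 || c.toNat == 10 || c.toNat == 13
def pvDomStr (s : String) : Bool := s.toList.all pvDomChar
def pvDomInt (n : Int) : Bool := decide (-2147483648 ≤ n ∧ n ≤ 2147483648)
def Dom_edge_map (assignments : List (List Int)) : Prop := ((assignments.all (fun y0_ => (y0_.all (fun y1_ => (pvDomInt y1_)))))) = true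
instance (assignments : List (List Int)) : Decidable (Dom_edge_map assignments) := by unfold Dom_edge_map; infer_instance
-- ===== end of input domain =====

-- B replaces A's pairwise set-intersection test over all index pairs by an inverted index:
-- one pass builds a bucket per element value listing the distinct assignments containing it;
-- each assignment's conflict set is the union of its elements' buckets, and its neighbors are
-- the distinct keys outside that conflict set (objective: alternative algorithm, no per-pair
-- intersections). Neither program mutates its argument; the equivalence is about the return value.

-- ===== PORT A =====
def no_cross (a b : List Int) : Bool :=
  PySem.Set.equal (PySem.Set.inter (PySem.Set.ofList a) (PySem.Set.ofList b)) PySem.Set.empty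

def edge_map (assignments : List (List Int)) : List (List Int × List (List Int)) :=
  let n := PySem.List.len assignments
  let graph : PySem.Dict (List Int) (PySem.Set (List Int)) :=
    (PySem.List.pyRange 0 n 1).foldl
      (fun g i => g.insert (PySem.List.pyGetD assignments i []) PySem.Set.empty)
      PySem.Dict.empty
  let graph :=
    (PySem.List.pyRange 0 n 1).foldl (fun g i =>
      (PySem.List.pyRange (i + 1) n 1).foldl (fun g j =>
        if no_cross (PySem.List.pyGetD assignments i []) (PySem.List.pyGetD assignments j []) then
          ((g.modify (PySem.List.pyGetD assignments i []) []
              (fun s => s.add (PySem.List.pyGetD assignments j []))).modify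
            (PySem.List.pyGetD assignments j []) []
              (fun s => s.add (PySem.List.pyGetD assignments i [])))
        else g) g) graph
  graph.items

-- ===== PORT B =====
-- buckets[e] is always present when read (e ranges over elements of a key that filled bucket e),
-- so Python's buckets[e] is ported as getD with [] exactly.
def edge_map_alt (assignments : List (List Int)) : List (List Int × List (List Int)) :=
  let keys := PySem.List.dedup assignments
  let buckets : PySem.Dict Int (List (List Int)) :=
    keys.foldl (fun d a =>
      (PySem.Set.ofList a).foldl (fun d e => d.insert e (d.getD e [] ++ [a])) d)
      PySem.Dict.empty
  let graph : PySem.Dict (List Int) (PySem.Set (List Int)) :=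
    keys.foldl (fun g a =>
      g.insert a (PySem.Set.ofList (keys.filter (fun b =>
        !(PySem.Set.contains ((PySem.Set.ofList a).foldl
            (fun c e => PySem.Set.update c (buckets.getD e []))
            (PySem.Set.ofList [a])) b)))))
      PySem.Dict.empty
  graph.items

-- ===== PRECONDITION & SPEC =====
-- Pre_ excludes inputs in which the empty assignment occurs more than once: there A records a
-- self-edge for the empty assignment (two distinct positions hold the same, vacuously disjoint
-- node), while B's node-based view yields no self-loops — an unspecified corner on which both
-- values are defensible.
def Pre_edge_map (assignments : List (List Int)) : Prop := assignments.count [] ≤ 1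
instance (assignments : List (List Int)) : Decidable (Pre_edge_map assignments) := by
  unfold Pre_edge_map; infer_instance

def pvWitness_edge_map : List (List Int) := [[1, 2], [3], []]

def Spec_edge_map (assignments : List (List Int)) (out : List (List Int × List (List Int))) : Prop := out = edge_map_alt assignments
instance (assignments : List (List Int)) (out : List (List Int × List (List Int))) : Decidable (Spec_edge_map assignments out) := by unfold Spec_edge_map; infer_instance

-- ===== CLAIM (what is proved, stated in full; the proofs are below) =====
def Claim_equal_edge_map : Prop := ∀ (assignments : List (List Int)), Dom_edge_map assignments → Pre_edge_map assignments → Spec_edge_map assignments (edge_map assignments)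

-- ===== LEMMAS AND PROOFS =====

def stepA (x : List Int) (g : PySem.Dict (List Int) (PySem.Set (List Int))) (b : List Int) :
    PySem.Dict (List Int) (PySem.Set (List Int)) :=
  if no_cross x b then
    ((g.modify x [] (fun s => s.add b)).modify b [] (fun s => s.add x))
  else g

def loopA : List (List Int) → PySem.Dict (List Int) (PySem.Set (List Int)) →
    PySem.Dict (List Int) (PySem.Set (List Int))
  | [], g => g
  | x :: rest, g => loopA rest (rest.foldl (stepA x) g)

def blockC (x : List Int) (rest : List (List Int)) (a : List Int) : List (List Int) :=
  match rest with
  | [] => []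
  | b :: rest' =>
    (if no_cross x b then
        (if a = x then [b] else []) ++ (if a = b then [x] else [])
      else []) ++ blockC x rest' a

def contrib : List (List Int) → List Int → List (List Int)
  | [], _ => []
  | x :: rest, a => blockC x rest a ++ contrib rest a

lemma no_cross_iff (a b : List Int) : no_cross a b = true ↔ ∀ z ∈ a, z ∉ b := by
  unfold no_cross
  rw [PySem.Set.equal_iff]
  constructor
  · intro h z hz hzb
    exact (List.not_mem_nil (a := z)).elim (((h z).mp) (by
      rw [PySem.Set.mem_inter, PySem.Set.mem_ofList, PySem.Set.mem_ofList]; exact ⟨hz, hzb⟩))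
  · intro h z
    constructor
    · intro hz
      rw [PySem.Set.mem_inter, PySem.Set.mem_ofList, PySem.Set.mem_ofList] at hz
      exact absurd hz.2 (h z hz.1)
    · intro hz; exact absurd hz (List.not_mem_nil)

lemma no_cross_self (x : List Int) (h : no_cross x x = true) : x = [] := by
  cases x with
  | nil => rfl
  | cons y ys => exact absurd (List.mem_cons_self) ((no_cross_iff _ _).mp h y List.mem_cons_self)

lemma stepA_contains (x b : List Int) (g : PySem.Dict (List Int) (PySem.Set (List Int)))
    (hx : g.contains x = true) (hb : g.contains b = true) (y : List Int) :
    (stepA x g b).contains y = g.contains y := by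
  unfold stepA
  by_cases hnc : no_cross x b = true
  · rw [if_pos hnc, PySem.Dict.contains_modify, PySem.Dict.contains_modify]
    rcases eq_or_ne y b with rfl | hyb
    · simp [hb]
    · rcases eq_or_ne y x with rfl | hyx
      · simp [hx]
      · rw [beq_eq_false_iff_ne.mpr hyb, beq_eq_false_iff_ne.mpr hyx]; simp
  · rw [if_neg hnc]

lemma stepA_keys (x b : List Int) (g : PySem.Dict (List Int) (PySem.Set (List Int)))
    (hx : g.contains x = true) (hb : g.contains b = true) :
    (stepA x g b).keys = g.keys := by
  unfold stepA
  by_cases hnc : no_cross x b = true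
  · rw [if_pos hnc]
    have h1 : (g.modify x [] (fun s => s.add b)).keys = g.keys := by
      rw [PySem.Dict.keys_modify, PySem.Dict.keys_insert_of_contains _ _ hx]
    have h2 : (g.modify x [] (fun s => s.add b)).contains b = true := by
      rw [PySem.Dict.contains_modify]; simp [hb]
    rw [PySem.Dict.keys_modify, PySem.Dict.keys_insert_of_contains _ _ h2, h1]
  · rw [if_neg hnc]

lemma keys_foldl_stepA (x : List Int) (rest : List (List Int))
    (g : PySem.Dict (List Int) (PySem.Set (List Int)))
    (hx : g.contains x = true) (hrest : ∀ b ∈ rest, g.contains b = true) :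
    (rest.foldl (stepA x) g).keys = g.keys ∧
      ∀ y, (rest.foldl (stepA x) g).contains y = g.contains y := by
  induction rest generalizing g with
  | nil => exact ⟨rfl, fun _ => rfl⟩
  | cons b rest' ih =>
    rw [List.foldl_cons]
    have hb := hrest b List.mem_cons_self
    have hx' : (stepA x g b).contains x = true := by rw [stepA_contains x b g hx hb]; exact hx
    have hrest' : ∀ c ∈ rest', (stepA x g b).contains c = true := fun c hc => by
      rw [stepA_contains x b g hx hb]; exact hrest c (List.mem_cons_of_mem _ hc)
    obtain ⟨h1, h2⟩ := ih (stepA x g b) hx' hrest'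
    exact ⟨h1.trans (stepA_keys x b g hx hb),
      fun y => (h2 y).trans (stepA_contains x b g hx hb y)⟩

lemma keys_loopA (xs : List (List Int)) (g : PySem.Dict (List Int) (PySem.Set (List Int)))
    (h : ∀ y ∈ xs, g.contains y = true) :
    (loopA xs g).keys = g.keys := by
  induction xs generalizing g with
  | nil => rfl
  | cons x rest ih =>
    show (loopA rest (rest.foldl (stepA x) g)).keys = g.keys
    have hx := h x List.mem_cons_self
    have hrest : ∀ b ∈ rest, g.contains b = true := fun b hb => h b (List.mem_cons_of_mem _ hb)
    obtain ⟨h1, h2⟩ := keys_foldl_stepA x rest g hx hrest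
    rw [ih _ (fun y hy => by rw [h2 y]; exact hrest y hy), h1]

lemma getD_stepA (x b : List Int) (g : PySem.Dict (List Int) (PySem.Set (List Int))) (a : List Int) :
    (stepA x g b).getD a []
      = ((if no_cross x b then (if a = x then [b] else []) ++ (if a = b then [x] else [])
          else []).foldl PySem.Set.add (g.getD a [])) := by
  unfold stepA
  by_cases hnc : no_cross x b = true
  · rw [if_pos hnc, if_pos hnc, PySem.Dict.getD_modify, PySem.Dict.getD_modify]
    rcases eq_or_ne a b with rfl | hab
    · rcases eq_or_ne a x with rfl | hax
      · simp
      · simp [hax, PySem.Dict.getD_modify]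
    · rcases eq_or_ne a x with rfl | hax
      · simp [hab]
      · simp [hab, hax, PySem.Dict.getD_modify]
  · rw [if_neg hnc, if_neg hnc]; rfl

lemma getD_foldl_stepA (x : List Int) (rest : List (List Int))
    (g : PySem.Dict (List Int) (PySem.Set (List Int))) (a : List Int) :
    (rest.foldl (stepA x) g).getD a []
      = (blockC x rest a).foldl PySem.Set.add (g.getD a []) := by
  induction rest generalizing g with
  | nil => rfl
  | cons b rest' ih =>
    rw [List.foldl_cons, ih, blockC, List.foldl_append, getD_stepA]

lemma getD_loopA (xs : List (List Int)) (g : PySem.Dict (List Int) (PySem.Set (List Int)))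
    (a : List Int) :
    (loopA xs g).getD a [] = (contrib xs a).foldl PySem.Set.add (g.getD a []) := by
  induction xs generalizing g with
  | nil => rfl
  | cons x rest ih =>
    show (loopA rest (rest.foldl (stepA x) g)).getD a [] = _
    rw [ih, getD_foldl_stepA, contrib, List.foldl_append]

lemma blockC_of_ne (x : List Int) (rest : List (List Int)) (a : List Int)
    (hax : a ≠ x) (har : a ∉ rest) : blockC x rest a = [] := by
  induction rest with
  | nil => rfl
  | cons b rest' ih =>
    rw [blockC, ih (fun h => har (List.mem_cons_of_mem _ h))]
    have hab : a ≠ b := fun h => har (h ▸ List.mem_cons_self)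
    simp [hax, hab]

lemma contrib_of_not_mem (xs : List (List Int)) (a : List Int) (h : a ∉ xs) :
    contrib xs a = [] := by
  induction xs with
  | nil => rfl
  | cons x rest ih =>
    rw [contrib, ih (fun hm => h (List.mem_cons_of_mem _ hm)),
      blockC_of_ne x rest a (fun he => h (he ▸ List.mem_cons_self))
        (fun hm => h (List.mem_cons_of_mem _ hm))]
    rfl

lemma blockC_eq (x : List Int) (rest : List (List Int)) (a : List Int)
    (h : x = [] → [] ∉ rest) :
    blockC x rest a = if a = x then rest.filter (fun b => no_cross x b)
      else (rest.filter (fun b => (b == a) && no_cross x b)).map (fun _ => x) := by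
  induction rest with
  | nil => simp [blockC]
  | cons b rest' ih =>
    have h' : x = [] → [] ∉ rest' := fun he hm => h he (List.mem_cons_of_mem _ hm)
    rw [blockC, ih h']
    by_cases hax : a = x
    · subst hax
      rw [if_pos rfl, if_pos rfl]
      by_cases hnc : no_cross a b = true
      · have hab : a ≠ b := by
          intro he
          have hb0 : b = [] := no_cross_self b (by rwa [he] at hnc)
          exact h (he.trans hb0) (by rw [hb0]; exact List.mem_cons_self)
        rw [List.filter_cons_of_pos hnc]
        simp [hnc, hab]
      · rw [List.filter_cons_of_neg (by simpa using hnc)]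
        simp [hnc]
    · rw [if_neg hax, if_neg hax]
      by_cases hab : a = b
      · subst hab
        by_cases hnc : no_cross x a = true
        · rw [List.filter_cons_of_pos (p := fun b => b == a && no_cross x b) (by simp [hnc])]
          simp [hnc, hax]
        · rw [List.filter_cons_of_neg (p := fun b => b == a && no_cross x b) (by simp [hnc])]
          simp [hnc, hax]
      · rw [List.filter_cons_of_neg (p := fun b => b == a && no_cross x b) (by simp [beq_eq_false_iff_ne.mpr (Ne.symm hab)])]
        simp [hax, hab, ite_self]

def qpred (a b : List Int) : Bool := (b != a) && no_cross a b

lemma ofList_filter (p : List Int → Bool) (l : List (List Int)) :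
    PySem.Set.ofList (l.filter p) = (PySem.Set.ofList l).filter p := by
  induction l with
  | nil => rfl
  | cons x xs ih =>
    rw [PySem.Set.ofList_cons]
    by_cases hx : p x = true
    · rw [List.filter_cons_of_pos hx, PySem.Set.ofList_cons, ih]
      simp only [PySem.Set.discard]
      rw [List.filter_cons_of_pos hx, List.filter_filter, List.filter_filter]
      congr 1
      exact List.filter_congr (fun b _ => by rw [Bool.and_comm])
    · rw [List.filter_cons_of_neg (by simp_all), ih]
      simp only [PySem.Set.discard]
      rw [List.filter_cons_of_neg (by simp_all), List.filter_filter]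
      refine (List.filter_congr (fun b _ => ?_)).symm
      by_cases hbx : b = x
      · subst hbx; simp [hx]
      · simp [hbx]

lemma update_of_forall_mem (s : PySem.Set (List Int)) (l : List (List Int))
    (h : ∀ b ∈ l, b ∈ s) : PySem.Set.update s l = s := by
  rw [PySem.Set.update_eq_append_filter]
  have : List.filter (fun y => !s.contains y) (PySem.Set.ofList l) = [] := by
    rw [List.filter_eq_nil_iff]
    intro b hb
    have := h b ((PySem.Set.mem_ofList _ _).mp hb)
    simp [this]
  rw [this, List.append_nil]

lemma update_filter_ne_of_mem (s : PySem.Set (List Int)) (l : List (List Int)) (y : List Int)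
    (hy : y ∈ s) : PySem.Set.update s (l.filter (fun b => b != y)) = PySem.Set.update s l := by
  rw [PySem.Set.update_eq_append_filter, PySem.Set.update_eq_append_filter]
  congr 1
  rw [ofList_filter, List.filter_filter]
  refine List.filter_congr (fun b _ => ?_)
  by_cases hby : b = y
  · subst hby; simp [hy]
  · simp [hby]

lemma foldl_add_map_const (s : PySem.Set (List Int)) (l : List (List Int)) (x : List Int) :
    (l.map (fun _ => x)).foldl PySem.Set.add s = if l.isEmpty then s else s.add x := by
  induction l generalizing s with
  | nil => rfl
  | cons b bs ih =>
    simp only [List.map_cons, List.foldl_cons, ih, List.isEmpty_cons]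
    cases bs with
    | nil => simp
    | cons c cs =>
      simp only [List.isEmpty_cons, Bool.false_eq_true, if_false]
      rw [PySem.Set.add_of_mem (s := s.add x) (by rw [PySem.Set.mem_add]; right; rfl)]

lemma no_cross_symm (a b : List Int) : no_cross a b = no_cross b a := by
  rw [Bool.eq_iff_iff, no_cross_iff, no_cross_iff]
  constructor
  · intro h z hz hza; exact h z hza hz
  · intro h z hz hzb; exact h z hzb hz

lemma foldl_add_eq_update (s : PySem.Set (List Int)) (l : List (List Int)) :
    l.foldl PySem.Set.add s = PySem.Set.update s l := rfl

lemma dedup_cons (x : List Int) (rest : List (List Int)) :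
    PySem.List.dedup (x :: rest)
      = x :: (PySem.List.dedup rest).filter (fun y => y != x) := by
  rw [PySem.List.dedup_eq_ofList, PySem.Set.ofList_cons, PySem.List.dedup_eq_ofList]
  rfl

lemma contrib_foldl (xs : List (List Int)) (a : List Int) (s : PySem.Set (List Int))
    (hc : xs.count [] ≤ 1) (ha : a ∈ xs) :
    (contrib xs a).foldl PySem.Set.add s
      = PySem.Set.update s ((PySem.List.dedup xs).filter (qpred a)) := by
  induction xs generalizing s with
  | nil => exact absurd ha (List.not_mem_nil)
  | cons x rest ih =>
    have hc' : rest.count [] ≤ 1 := by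
      rw [List.count_cons] at hc; omega
    have hx0 : x = [] → [] ∉ rest := by
      intro he
      subst he
      rw [List.count_cons, if_pos (by rfl)] at hc
      exact List.count_eq_zero.mp (by omega)
    rw [contrib, List.foldl_append, blockC_eq x rest a hx0, dedup_cons]
    by_cases hax : a = x
    · subst hax
      rw [if_pos rfl]
      have hhead : qpred a a = false := by simp [qpred]
      rw [List.filter_cons_of_neg (by simp [hhead])]
      have hL2 : ∀ t : PySem.Set (List Int),
          PySem.Set.update t (rest.filter (fun b => no_cross a b))
            = PySem.Set.update t (((PySem.List.dedup rest).filter (fun y => y != a)).filter (qpred a)) := by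
        intro t
        rw [PySem.Set.update_eq_append_filter, PySem.Set.update_eq_append_filter]
        congr 1
        rw [ofList_filter, ofList_filter, ofList_filter, PySem.List.dedup_eq_ofList,
          PySem.Set.ofList_ofList, List.filter_filter, List.filter_filter, List.filter_filter]
        refine List.filter_congr (fun b hb => ?_)
        by_cases hba : b = a
        · subst hba
          have hncb : no_cross b b = false := by
            rw [← Bool.not_eq_true]
            intro hnc
            have hb0 := no_cross_self b hnc
            exact hx0 hb0 (hb0 ▸ ((PySem.Set.mem_ofList _ _).mp hb))
          simp [hncb, qpred]
        · have h1 : (b != a) = true := bne_iff_ne.mpr hba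
          simp [qpred, h1, Bool.and_comm]
      by_cases ham : a ∈ rest
      · rw [ih _ hc' ham, foldl_add_eq_update]
        rw [update_of_forall_mem]
        · exact hL2 s
        · intro b hb
          rw [List.mem_filter] at hb
          have hbr : b ∈ rest := (PySem.List.mem_dedup _ _).mp hb.1
          have hq := hb.2
          have : no_cross a b = true := by
            unfold qpred at hq; exact (Bool.and_elim_right hq)
          rw [PySem.Set.mem_update]
          right
          rw [List.mem_filter]
          exact ⟨hbr, this⟩
      · rw [contrib_of_not_mem rest a ham, List.foldl_nil, foldl_add_eq_update]
        exact hL2 s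
    · have ham : a ∈ rest := by
        rcases List.mem_cons.mp ha with h1 | h1
        · exact absurd h1 hax
        · exact h1
      rw [if_neg hax, foldl_add_map_const]
      have hq_x : qpred a x = no_cross x a := by
        unfold qpred
        rw [bne_iff_ne.mpr (Ne.symm hax), Bool.true_and, no_cross_symm]
      by_cases hnc : no_cross x a = true
      · have hne : (rest.filter (fun b => (b == a) && no_cross x b)).isEmpty = false := by
          rw [List.isEmpty_eq_false_iff_exists_mem]
          exact ⟨a, List.mem_filter.mpr ⟨ham, by simp [hnc]⟩⟩
        rw [hne]
        simp only [Bool.false_eq_true, if_false]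
        rw [List.filter_cons_of_pos (p := qpred a) (by rw [hq_x]; exact hnc),
          PySem.Set.update_cons, ih _ hc' ham]
        have : ((PySem.List.dedup rest).filter (fun y => y != x)).filter (qpred a)
            = ((PySem.List.dedup rest).filter (qpred a)).filter (fun b => b != x) := by
          rw [List.filter_filter, List.filter_filter]
          exact List.filter_congr (fun b _ => Bool.and_comm _ _)
        rw [this, update_filter_ne_of_mem _ _ x (by rw [PySem.Set.mem_add]; right; rfl)]
      · have hemp : (rest.filter (fun b => (b == a) && no_cross x b)).isEmpty = true := by
          rw [List.isEmpty_iff, List.filter_eq_nil_iff]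
          intro b hb
          by_cases hba : b = a
          · subst hba
            simp [hnc]
          · simp [beq_eq_false_iff_ne.mpr hba]
        rw [hemp, if_pos rfl, ih _ hc' ham,
          List.filter_cons_of_neg (p := qpred a) (by rw [hq_x]; simpa using hnc)]
        congr 1
        rw [List.filter_filter]
        refine (List.filter_congr (fun b hb => ?_)).symm
        by_cases hbx : b = x
        · subst hbx
          have : qpred a b = false := by rw [hq_x, ← Bool.not_eq_true]; exact hnc
          simp [this]
        · simp [bne_iff_ne.mpr hbx]

def canon (xs : List (List Int)) : List (List Int × List (List Int)) :=
  (PySem.List.dedup xs).map (fun a => (a, (PySem.List.dedup xs).filter (qpred a)))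

lemma items_eq_keys_map (d : PySem.Dict (List Int) (PySem.Set (List Int)))
    (h : d.keys.Nodup) :
    d.items = d.keys.map (fun k => (k, d.getD k [])) := by
  have keys_eq : d.keys = d.items.map Prod.fst := rfl
  rw [keys_eq, List.map_map]
  have : d.items.map ((fun k => (k, d.getD k [])) ∘ Prod.fst) = d.items.map id := by
    refine List.map_congr_left (fun p hp => ?_)
    have hpi : (p.1, p.2) ∈ d.items := by simpa using hp
    have := PySem.Dict.getD_of_mem_items d hpi h []
    simp [Function.comp, this]
  rw [this, List.map_id]

lemma items_foldl_insert_nodup {α : Type} (l : List α) (key : α → List Int)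
    (val : α → PySem.Set (List Int)) (h : (l.map key).Nodup) :
    (l.foldl (fun d e => d.insert (key e) (val e)) PySem.Dict.empty).items
      = l.map (fun e => (key e, val e)) := by
  induction l using List.reverseRecOn with
  | nil => rfl
  | append_singleton l e ih =>
    rw [List.foldl_append, List.foldl_cons, List.foldl_nil]
    have hnd : (l.map key).Nodup := by
      rw [List.map_append] at h; exact h.sublist (List.sublist_append_left _ _)
    have hne : key e ∉ l.map key := by
      rw [List.map_append] at h
      intro hmem
      exact (List.disjoint_of_nodup_append h) hmem (by simp)
    have hkeys : (l.foldl (fun d e => d.insert (key e) (val e)) PySem.Dict.empty).keys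
        = l.map key := by
      have : (l.foldl (fun d e => d.insert (key e) (val e)) PySem.Dict.empty).keys
          = (l.foldl (fun d e => d.insert (key e) (val e)) PySem.Dict.empty).items.map Prod.fst := rfl
      rw [this, ih hnd, List.map_map]; rfl
    have hcont : (l.foldl (fun d e => d.insert (key e) (val e)) PySem.Dict.empty).contains (key e) = false := by
      rw [← Bool.not_eq_true, PySem.Dict.contains_iff_mem_keys, hkeys]
      exact hne
    rw [PySem.Dict.items_insert_of_not_contains _ _ hcont, ih hnd, List.map_append]
    rfl

lemma initA (xs : List (List Int)) :
    xs.foldl (fun g a => g.insert a PySem.Set.empty) PySem.Dict.empty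
      = PySem.Dict.mk ((PySem.List.dedup xs).map (fun a => (a, ([] : PySem.Set (List Int))))) := by
  induction xs using List.reverseRecOn with
  | nil => rfl
  | append_singleton xs x ih =>
    rw [List.foldl_append, List.foldl_cons, List.foldl_nil, ih]
    have hkeys : (PySem.Dict.mk ((PySem.List.dedup xs).map (fun a => (a, ([] : PySem.Set (List Int)))))).keys
        = PySem.List.dedup xs := by
      show ((PySem.List.dedup xs).map (fun a => (a, ([] : PySem.Set (List Int))))).map Prod.fst
          = PySem.List.dedup xs
      rw [List.map_map]; simp [Function.comp_def]
    by_cases hx : x ∈ xs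
    · have hc : (PySem.Dict.mk ((PySem.List.dedup xs).map (fun a => (a, ([] : PySem.Set (List Int)))))).contains x = true := by
        rw [PySem.Dict.contains_iff_mem_keys, hkeys, PySem.List.dedup_eq_ofList, PySem.Set.mem_ofList]
        exact hx
      have hitems := PySem.Dict.items_insert_of_contains _ (PySem.Set.empty (α := List Int)) hc
      have hded : PySem.List.dedup (xs ++ [x]) = PySem.List.dedup xs := by
        rw [PySem.List.dedup_eq_ofList, PySem.List.dedup_eq_ofList, PySem.Set.ofList_append_singleton,
          PySem.Set.add_of_mem (by rw [PySem.Set.mem_ofList]; exact hx)]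
      have hsame : ((PySem.Dict.mk ((PySem.List.dedup xs).map (fun a => (a, ([] : PySem.Set (List Int)))))).insert x PySem.Set.empty).items
          = (PySem.List.dedup xs).map (fun a => (a, ([] : PySem.Set (List Int)))) := by
        rw [hitems]
        show ((PySem.List.dedup xs).map (fun a => (a, ([] : PySem.Set (List Int))))).map
            (fun p => if (p.1 == x) = true then (x, PySem.Set.empty) else p) = _
        rw [List.map_map]
        refine List.map_congr_left (fun a _ => ?_)
        by_cases hax : a = x
        · subst hax; simp [Function.comp]
        · simp [Function.comp, hax]
      calc _ = PySem.Dict.mk (((PySem.Dict.mk ((PySem.List.dedup xs).map (fun a => (a, ([] : PySem.Set (List Int)))))).insert x PySem.Set.empty).items) := rfl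
        _ = _ := by rw [hsame, hded]
    · have hc : (PySem.Dict.mk ((PySem.List.dedup xs).map (fun a => (a, ([] : PySem.Set (List Int)))))).contains x = false := by
        rw [← Bool.not_eq_true, PySem.Dict.contains_iff_mem_keys, hkeys, PySem.List.dedup_eq_ofList, PySem.Set.mem_ofList]
        exact hx
      have hitems := PySem.Dict.items_insert_of_not_contains _ (PySem.Set.empty (α := List Int)) hc
      have hded : PySem.List.dedup (xs ++ [x]) = PySem.List.dedup xs ++ [x] := by
        rw [PySem.List.dedup_eq_ofList, PySem.List.dedup_eq_ofList, PySem.Set.ofList_append_singleton,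
          PySem.Set.add_of_not_mem (by rw [PySem.Set.mem_ofList]; exact hx)]
      calc _ = PySem.Dict.mk (((PySem.Dict.mk ((PySem.List.dedup xs).map (fun a => (a, ([] : PySem.Set (List Int)))))).insert x PySem.Set.empty).items) := rfl
        _ = _ := by rw [hitems, hded, List.map_append]; rfl

lemma stepA_eq (x : List Int) (g : PySem.Dict (List Int) (PySem.Set (List Int))) (b : List Int) :
    (if no_cross x b = true then
        ((g.modify x [] (fun s => s.add b)).modify b [] (fun s => s.add x))
      else g) = stepA x g b := rfl

lemma outer_loop (xs : List (List Int)) :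
    ∀ (m k : Nat) (g : PySem.Dict (List Int) (PySem.Set (List Int))), xs.length - k = m →
    (PySem.List.pyRange (k : Int) (xs.length : Int) 1).foldl (fun g i =>
      (PySem.List.pyRange (i + 1) (xs.length : Int) 1).foldl (fun g j =>
        stepA (PySem.List.pyGetD xs i []) g (PySem.List.pyGetD xs j [])) g) g
      = loopA (xs.drop k) g := by
  intro m
  induction m with
  | zero =>
    intro k g hm
    have hk : xs.length ≤ k := by omega
    rw [PySem.List.pyRange_one_eq_nil (by exact_mod_cast hk), List.foldl_nil,
      List.drop_of_length_le hk]
    rfl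
  | succ m ih =>
    intro k g hm
    have hk : k < xs.length := by omega
    rw [PySem.List.pyRange_one_cons (by exact_mod_cast hk), List.foldl_cons]
    have hcast : ((k : Int) + 1) = ((k + 1 : Nat) : Int) := by push_cast; ring
    have hget : PySem.List.pyGetD xs (k : Int) [] = xs[k] := by
      rw [PySem.List.pyGetD_natCast, List.getD_eq_getElem _ _ hk]
    rw [hget, hcast,
      PySem.List.foldl_pyRange_pyGetD' xs [] (stepA xs[k]) g
        (a := ((k + 1 : Nat) : Int)) (by positivity)]
    have hdrop : xs.drop k = xs[k] :: xs.drop (k + 1) := List.drop_eq_getElem_cons hk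
    rw [ih (k + 1) _ (by omega), hdrop]
    show loopA (xs[k] :: xs.drop (k + 1)) g = _
    rw [loopA]

lemma edge_map_eq_canon (xs : List (List Int)) (hc : xs.count [] ≤ 1) :
    edge_map xs = canon xs := by
  unfold edge_map
  simp only [PySem.List.len_eq, stepA_eq]
  rw [PySem.List.foldl_pyRange_zero_pyGetD' xs []
      (fun g v => g.insert v PySem.Set.empty) PySem.Dict.empty]
  rw [initA xs]
  have h0 := outer_loop xs (xs.length - 0) 0
      (PySem.Dict.mk ((PySem.List.dedup xs).map (fun a => (a, ([] : PySem.Set (List Int)))))) rfl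
  rw [Int.natCast_zero] at h0
  rw [h0, List.drop_zero]
  set g0 := PySem.Dict.mk ((PySem.List.dedup xs).map (fun a => (a, ([] : PySem.Set (List Int))))) with hg0
  have hkeys0 : g0.keys = PySem.List.dedup xs := by
    show ((PySem.List.dedup xs).map (fun a => (a, ([] : PySem.Set (List Int))))).map Prod.fst
        = PySem.List.dedup xs
    rw [List.map_map]; simp [Function.comp_def]
  have hnd : (PySem.List.dedup xs).Nodup := PySem.List.nodup_dedup xs
  have hcont : ∀ y ∈ xs, g0.contains y = true := fun y hy => by
    rw [PySem.Dict.contains_iff_mem_keys, hkeys0, PySem.List.mem_dedup]; exact hy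
  have hkeys : (loopA xs g0).keys = PySem.List.dedup xs := by
    rw [keys_loopA xs g0 hcont, hkeys0]
  rw [items_eq_keys_map _ (by rw [hkeys]; exact hnd), hkeys]
  unfold canon
  refine List.map_congr_left (fun a ha => ?_)
  have hax : a ∈ xs := (PySem.List.mem_dedup _ _).mp ha
  have hg0a : g0.getD a [] = [] := by
    refine PySem.Dict.getD_of_mem_items g0 ?_ (by rw [hkeys0]; exact hnd) []
    show (a, ([] : PySem.Set (List Int))) ∈ (PySem.List.dedup xs).map (fun a => (a, ([] : PySem.Set (List Int))))
    exact List.mem_map.mpr ⟨a, ha, rfl⟩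
  rw [getD_loopA, hg0a, contrib_foldl xs a [] hc hax, PySem.Set.update_nil_left,
    PySem.Set.ofList_eq_self_of_nodup _ (hnd.filter _)]

-- ===== B-side lemmas =====

-- membership in a bucket after the inner loop over one key's element set
lemma bucket_inner (a : List Int) (l : List Int) (d : PySem.Dict Int (List (List Int)))
    (e : Int) (b : List Int) :
    b ∈ (l.foldl (fun d e => d.insert e (d.getD e [] ++ [a])) d).getD e []
      ↔ b ∈ d.getD e [] ∨ (b = a ∧ e ∈ l) := by
  induction l generalizing d with
  | nil => simp
  | cons e' l' ih =>
    rw [List.foldl_cons, ih, PySem.Dict.getD_insert]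
    split_ifs with he
    · subst he
      constructor
      · rintro (h | h)
        · rcases List.mem_append.mp h with h1 | h1
          · left; exact h1
          · right; exact ⟨by simpa using h1, List.mem_cons_self⟩
        · right; exact ⟨h.1, List.mem_cons_of_mem _ h.2⟩
      · rintro (h | ⟨rfl, h2⟩)
        · left; exact List.mem_append.mpr (Or.inl h)
        · rcases List.mem_cons.mp h2 with _ | h3
          · left; exact List.mem_append.mpr (Or.inr (by simp))
          · right; exact ⟨rfl, h3⟩
    · constructor
      · rintro (h | h)
        · left; exact h
        · right; exact ⟨h.1, List.mem_cons_of_mem _ h.2⟩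
      · rintro (h | ⟨rfl, h2⟩)
        · left; exact h
        · rcases List.mem_cons.mp h2 with rfl | h3
          · exact absurd rfl he
          · right; exact ⟨rfl, h3⟩

-- membership in a bucket after the whole bucket-building pass
lemma bucket_mem (ks : List (List Int)) (d : PySem.Dict Int (List (List Int)))
    (e : Int) (b : List Int) :
    b ∈ (ks.foldl (fun d a =>
          (PySem.Set.ofList a).foldl (fun d e => d.insert e (d.getD e [] ++ [a])) d) d).getD e []
      ↔ b ∈ d.getD e [] ∨ (b ∈ ks ∧ e ∈ b) := by
  induction ks generalizing d with
  | nil => simp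
  | cons a ks' ih =>
    rw [List.foldl_cons, ih, bucket_inner]
    rw [PySem.Set.mem_ofList]
    constructor
    · rintro ((h | ⟨rfl, h2⟩) | ⟨hb, he⟩)
      · left; exact h
      · right; exact ⟨List.mem_cons_self, h2⟩
      · right; exact ⟨List.mem_cons_of_mem _ hb, he⟩
    · rintro (h | ⟨hb, he⟩)
      · left; left; exact h
      · rcases List.mem_cons.mp hb with rfl | hb'
        · left; right; exact ⟨rfl, he⟩
        · right; exact ⟨hb', he⟩

lemma items_foldl_insert_nodup' (l : List (List Int))
    (val : List Int → PySem.Set (List Int)) (h : l.Nodup) :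
    (l.foldl (fun d a => d.insert a (val a)) PySem.Dict.empty).items
      = l.map (fun a => (a, val a)) :=
  items_foldl_insert_nodup l id val (by simpa using h)

-- membership in the conflict set
lemma conflict_mem (l : List Int) (c0 : PySem.Set (List Int))
    (f : Int → List (List Int)) (x : List Int) :
    x ∈ l.foldl (fun c e => PySem.Set.update c (f e)) c0
      ↔ x ∈ c0 ∨ ∃ e ∈ l, x ∈ f e := by
  induction l generalizing c0 with
  | nil => simp
  | cons e l' ih =>
    rw [List.foldl_cons, ih, PySem.Set.mem_update]
    constructor
    · rintro ((h | h) | ⟨e', he', hx⟩)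
      · left; exact h
      · right; exact ⟨e, List.mem_cons_self, h⟩
      · right; exact ⟨e', List.mem_cons_of_mem _ he', hx⟩
    · rintro (h | ⟨e', he', hx⟩)
      · left; left; exact h
      · rcases List.mem_cons.mp he' with rfl | he''
        · left; right; exact hx
        · right; exact ⟨e', he'', hx⟩

lemma edge_map_alt_eq_canon (xs : List (List Int)) : edge_map_alt xs = canon xs := by
  unfold edge_map_alt
  set keys := PySem.List.dedup xs with hkeysdef
  have hnd : keys.Nodup := PySem.List.nodup_dedup xs
  set buckets : PySem.Dict Int (List (List Int)) :=
    keys.foldl (fun d a =>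
      (PySem.Set.ofList a).foldl (fun d e => d.insert e (d.getD e [] ++ [a])) d)
      PySem.Dict.empty with hbdef
  have hbucket : ∀ (e : Int) (b : List Int),
      b ∈ buckets.getD e [] ↔ b ∈ keys ∧ e ∈ b := by
    intro e b
    rw [hbdef, bucket_mem]
    simp [PySem.Dict.getD_empty]
  -- value of each node
  have hval : ∀ a ∈ keys,
      PySem.Set.ofList (keys.filter (fun b =>
        !(PySem.Set.contains ((PySem.Set.ofList a).foldl
            (fun c e => PySem.Set.update c (buckets.getD e []))
            (PySem.Set.ofList [a])) b)))
        = keys.filter (qpred a) := by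
    intro a _
    have hfe : keys.filter (fun b =>
        !(PySem.Set.contains ((PySem.Set.ofList a).foldl
            (fun c e => PySem.Set.update c (buckets.getD e []))
            (PySem.Set.ofList [a])) b)) = keys.filter (qpred a) := by
      refine List.filter_congr (fun b hb => ?_)
      have hmem : b ∈ ((PySem.Set.ofList a).foldl
            (fun c e => PySem.Set.update c (buckets.getD e []))
            (PySem.Set.ofList [a])) ↔ b = a ∨ ¬ no_cross a b = true := by
        rw [conflict_mem]
        constructor
        · rintro (h | ⟨e, he, hx⟩)
          · left
            have : b ∈ [a] := (PySem.Set.mem_ofList _ _).mp h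
            simpa using this
          · right
            intro hnc
            have hea : e ∈ a := (PySem.Set.mem_ofList _ _).mp he
            have heb : e ∈ b := ((hbucket e b).mp hx).2
            exact (no_cross_iff a b).mp hnc e hea heb
        · rintro (rfl | h)
          · left; rw [PySem.Set.mem_ofList]; exact List.mem_cons_self
          · right
            rw [no_cross_iff] at h
            push_neg at h
            obtain ⟨e, hea, heb⟩ := h
            exact ⟨e, (PySem.Set.mem_ofList _ _).mpr hea, (hbucket e b).mpr ⟨hb, heb⟩⟩
      rw [Bool.eq_iff_iff]
      simp only [Bool.not_eq_true', ← Bool.not_eq_true, PySem.Set.contains_iff, hmem, qpred,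
        Bool.and_eq_true, bne_iff_ne]
      tauto
    rw [hfe, PySem.Set.ofList_eq_self_of_nodup _ (hnd.filter _)]
  rw [items_foldl_insert_nodup' keys
      (fun a => PySem.Set.ofList (keys.filter (fun b =>
        !(PySem.Set.contains ((PySem.Set.ofList a).foldl
            (fun c e => PySem.Set.update c (buckets.getD e []))
            (PySem.Set.ofList [a])) b))))
      hnd]
  unfold canon
  rw [← hkeysdef]
  refine List.map_congr_left (fun a ha => ?_)
  rw [hval a ha]

-- ===== VERDICT (by name: the statement is the Claim_ definition above) =====
theorem edge_map_spec : Claim_equal_edge_map := by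
  intro xs _ hpre
  unfold Spec_edge_map
  rw [edge_map_eq_canon xs hpre, edge_map_alt_eq_canon xs]
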